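-- pv_equiv track=rewrite | github.com/happy-luck/LeetCode-python | LCP06.拿硬币.py | minCount
-- ===== SOURCE A (Python) =====
-- from typing import List
--
-- def minCount(coins: List[int]) -> int:
--     res = 0
--     for c in coins:
--         if c%2==0:
--             res += c//2
--         else:
--             res = res + c//2 + 1
--     return res
-- ===== SOURCE B (Python) =====
-- from typing import List
--
-- def minCount(coins: List[int]) -> int:
--     total = sum(coins)
--     odd = sum(1 for c in coins if c % 2 == 1)
--     return (total + odd) // 2
-- ===== Notes on version B (the rewrite author's own statement) =====
-- stated objective: simpler
-- what changed: Replaces the per-element branching accumulator with two whole-list reductions (sum and odd-count) combined by one exact arithmetic formula (total+odd)//2, using ceil(c/2) = (c + c%2)/2.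
import Mathlib
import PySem

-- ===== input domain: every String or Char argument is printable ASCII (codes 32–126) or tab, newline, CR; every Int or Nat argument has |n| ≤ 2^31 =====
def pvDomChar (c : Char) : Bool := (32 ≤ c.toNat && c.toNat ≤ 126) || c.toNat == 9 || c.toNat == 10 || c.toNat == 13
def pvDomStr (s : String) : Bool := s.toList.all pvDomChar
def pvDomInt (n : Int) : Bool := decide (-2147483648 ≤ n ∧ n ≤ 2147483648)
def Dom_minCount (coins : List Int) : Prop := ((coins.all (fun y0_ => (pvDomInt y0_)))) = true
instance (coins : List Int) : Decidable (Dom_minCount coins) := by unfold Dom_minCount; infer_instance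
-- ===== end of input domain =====

-- B replaces A's per-element branching accumulator with two reductions (sum and
-- odd-count) combined by one exact arithmetic formula; objective: simpler.

-- ===== PORT A =====
def minCount (coins : List Int) : Int :=
  coins.foldl
    (fun res c =>
      if PySem.Int.mod c 2 = 0 then res + PySem.Int.floordiv c 2
      else res + PySem.Int.floordiv c 2 + 1)
    0

-- ===== PORT B =====
def minCount_alt (coins : List Int) : Int :=
  let total := coins.foldl (· + ·) 0
  let odd : Int := ((coins.filter (fun c => PySem.Int.mod c 2 = 1)).length : Int)
  PySem.Int.floordiv (total + odd) 2

-- ===== PRECONDITION & SPEC =====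
def Spec_minCount (coins : List Int) (out : Int) : Prop := out = minCount_alt coins
instance (coins : List Int) (out : Int) : Decidable (Spec_minCount coins out) := by unfold Spec_minCount; infer_instance

-- ===== CLAIM (what is proved, stated in full; the proofs are below) =====
def Claim_equal_minCount : Prop := ∀ (coins : List Int), Dom_minCount coins → Spec_minCount coins (minCount coins)

-- ===== LEMMAS AND PROOFS =====

theorem pv_mod_two_cases (c : Int) :
    PySem.Int.mod c 2 = 0 ∨ PySem.Int.mod c 2 = 1 := by
  have h1 := PySem.Int.mod_nonneg c (b := 2) (by norm_num)
  have h2 := PySem.Int.mod_lt c (b := 2) (by norm_num)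
  omega

theorem pv_foldl_add (cs : List Int) : ∀ a : Int, cs.foldl (· + ·) a = a + cs.foldl (· + ·) 0 := by
  induction cs with
  | nil => simp
  | cons x xs ih => intro a; simp only [List.foldl_cons]; rw [ih (a + x), ih (0 + x)]; ring

-- loop invariant: twice A's fold from acc is 2*acc plus sum plus odd-count
theorem pv_fold_key (coins : List Int) : ∀ acc : Int,
    2 * (coins.foldl
      (fun res c =>
        if PySem.Int.mod c 2 = 0 then res + PySem.Int.floordiv c 2
        else res + PySem.Int.floordiv c 2 + 1) acc)
    = 2 * acc + coins.foldl (· + ·) 0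
        + ((coins.filter (fun c => PySem.Int.mod c 2 = 1)).length : Int) := by
  induction coins with
  | nil => intro acc; simp
  | cons c cs ih =>
    intro acc
    have hid := PySem.Int.floordiv_mul_add_mod c 2
    have hem : PySem.Int.mod c 2 = c % 2 := PySem.Int.mod_eq_emod_of_pos (by norm_num)
    rcases pv_mod_two_cases c with h | h
    · have h' : c % 2 = 0 := by omega
      simp only [List.foldl_cons, h, List.filter_cons]
      rw [ih, pv_foldl_add cs (0 + c)]
      simp
      omega
    · have h' : c % 2 = 1 := by omega
      have hne : ¬ PySem.Int.mod c 2 = 0 := by omega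
      simp only [List.foldl_cons, if_neg hne, List.filter_cons]
      rw [ih, pv_foldl_add cs (0 + c)]
      simp [h']
      omega

-- ===== VERDICT (by name: the statement is the Claim_ definition above) =====
theorem minCount_spec : Claim_equal_minCount := by
  intro coins _
  unfold Spec_minCount minCount minCount_alt
  have hkey := pv_fold_key coins 0
  have h2 : coins.foldl (· + ·) 0
      + ((coins.filter (fun c => PySem.Int.mod c 2 = 1)).length : Int)
      = 2 * (coins.foldl
        (fun res c =>
          if PySem.Int.mod c 2 = 0 then res + PySem.Int.floordiv c 2
          else res + PySem.Int.floordiv c 2 + 1) 0) := by omega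
  simp only []
  rw [h2, PySem.Int.floordiv_eq_ediv_of_pos (by norm_num)]
  omega
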